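-- pv_equiv track=rewrite | github.com/pypi-data/pypi-mirror-396 | packages/abnativ/abnativ-2.0.4.tar.gz/abnativ-2.0.4/abnativ/model/alignment/misc.py | iscontiguous
-- ===== SOURCE A (Python) =====
-- def iscontiguous(list_or_tuple, tolearte_equalities=False, check_reverse_first=False):
--     """
--     check whether a list of a tuple is contiguous, written to handle long list.
--     it returns two bool corresponding to contiguous,reverse
--     tolearte_equalities return True aslo if there are contiguous identical elements
--     use check_reverse_first=True if you believe that the list you give should be sorted from smaller to larger
--     if it is not contiguous it returns False, None
--     """
--     if not tolearte_equalities: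
--         if check_reverse_first:
--             if all(
--                 list_or_tuple[i] == list_or_tuple[i + 1] + 1
--                 for i in range(len(list_or_tuple) - 1)
--             ):
--                 return True, True
--             elif all(
--                 list_or_tuple[i] == list_or_tuple[i + 1] - 1
--                 for i in range(len(list_or_tuple) - 1)
--             ):
--                 return True, False
--         else:
--             if all(
--                 list_or_tuple[i] == list_or_tuple[i + 1] - 1
--                 for i in range(len(list_or_tuple) - 1)
--             ):
--                 return True, False
--             elif all(
--                 list_or_tuple[i] == list_or_tuple[i + 1] + 1
--                 for i in range(len(list_or_tuple) - 1)
--             ):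
--                 return True, True
--     else:
--         if check_reverse_first:
--             if all(
--                 list_or_tuple[i] == list_or_tuple[i + 1]
--                 or list_or_tuple[i] == list_or_tuple[i + 1] + 1
--                 for i in range(len(list_or_tuple) - 1)
--             ):
--                 return True, True
--             elif all(
--                 list_or_tuple[i] == list_or_tuple[i + 1]
--                 or list_or_tuple[i] == list_or_tuple[i + 1] - 1
--                 for i in range(len(list_or_tuple) - 1)
--             ):
--                 return True, False
--         else:
--             if all(
--                 list_or_tuple[i] == list_or_tuple[i + 1]
--                 or list_or_tuple[i] == list_or_tuple[i + 1] - 1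
--                 for i in range(len(list_or_tuple) - 1)
--             ):
--                 return True, False
--             elif all(
--                 list_or_tuple[i] == list_or_tuple[i + 1]
--                 or list_or_tuple[i] == list_or_tuple[i + 1] + 1
--                 for i in range(len(list_or_tuple) - 1)
--             ):
--                 return True, True
--     return False, None
-- ===== SOURCE B (Python) =====
-- def iscontiguous(list_or_tuple, tolearte_equalities=False, check_reverse_first=False):
--     asc_ok = True
--     desc_ok = True
--     for x, y in zip(list_or_tuple, list_or_tuple[1:]):
--         eq = tolearte_equalities and x == y
--         asc_ok = asc_ok and (eq or x == y - 1)
--         desc_ok = desc_ok and (eq or x == y + 1)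
--         if not asc_ok and not desc_ok:
--             break
--     if check_reverse_first:
--         if desc_ok:
--             return True, True
--         if asc_ok:
--             return True, False
--     else:
--         if asc_ok:
--             return True, False
--         if desc_ok:
--             return True, True
--     return False, None
-- ===== Notes on version B (the rewrite author's own statement) =====
-- stated objective: simpler
-- what changed: Replaced A's four separate full 'all' passes selected by nested flag branches with one fused scan over adjacent pairs that maintains asc_ok/desc_ok booleans (breaking when both fail), followed by a small priority block on check_reverse_first.
import Mathlib
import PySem

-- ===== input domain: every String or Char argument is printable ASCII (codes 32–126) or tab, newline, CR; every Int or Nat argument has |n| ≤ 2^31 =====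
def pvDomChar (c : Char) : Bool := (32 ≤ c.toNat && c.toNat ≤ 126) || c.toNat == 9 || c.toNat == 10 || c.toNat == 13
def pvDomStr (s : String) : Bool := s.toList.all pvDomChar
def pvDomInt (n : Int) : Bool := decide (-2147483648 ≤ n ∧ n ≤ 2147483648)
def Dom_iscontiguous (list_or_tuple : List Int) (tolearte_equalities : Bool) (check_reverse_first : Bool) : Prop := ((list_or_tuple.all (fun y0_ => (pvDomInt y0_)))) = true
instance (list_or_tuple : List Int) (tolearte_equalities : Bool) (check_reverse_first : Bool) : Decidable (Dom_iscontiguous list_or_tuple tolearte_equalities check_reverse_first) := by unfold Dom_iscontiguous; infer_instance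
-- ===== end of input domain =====

-- ===== PORT A =====
-- one honest line: B fuses A's four flag-selected 'all' passes into a single adjacent-pair scan with two booleans (objective: simpler)
def iscontiguous (list_or_tuple : List Int) (tolearte_equalities : Bool) (check_reverse_first : Bool) : Bool × Option Bool :=
  if !tolearte_equalities then
    if check_reverse_first then
      if (PySem.List.pyRange 0 (PySem.List.len list_or_tuple - 1) 1).all
          (fun i => PySem.List.pyGetD list_or_tuple i 0 == PySem.List.pyGetD list_or_tuple (i+1) 0 + 1) then
        (true, some true)
      else if (PySem.List.pyRange 0 (PySem.List.len list_or_tuple - 1) 1).all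
          (fun i => PySem.List.pyGetD list_or_tuple i 0 == PySem.List.pyGetD list_or_tuple (i+1) 0 - 1) then
        (true, some false)
      else (false, none)
    else
      if (PySem.List.pyRange 0 (PySem.List.len list_or_tuple - 1) 1).all
          (fun i => PySem.List.pyGetD list_or_tuple i 0 == PySem.List.pyGetD list_or_tuple (i+1) 0 - 1) then
        (true, some false)
      else if (PySem.List.pyRange 0 (PySem.List.len list_or_tuple - 1) 1).all
          (fun i => PySem.List.pyGetD list_or_tuple i 0 == PySem.List.pyGetD list_or_tuple (i+1) 0 + 1) then
        (true, some true)
      else (false, none)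
  else
    if check_reverse_first then
      if (PySem.List.pyRange 0 (PySem.List.len list_or_tuple - 1) 1).all
          (fun i => PySem.List.pyGetD list_or_tuple i 0 == PySem.List.pyGetD list_or_tuple (i+1) 0
                 || PySem.List.pyGetD list_or_tuple i 0 == PySem.List.pyGetD list_or_tuple (i+1) 0 + 1) then
        (true, some true)
      else if (PySem.List.pyRange 0 (PySem.List.len list_or_tuple - 1) 1).all
          (fun i => PySem.List.pyGetD list_or_tuple i 0 == PySem.List.pyGetD list_or_tuple (i+1) 0
                 || PySem.List.pyGetD list_or_tuple i 0 == PySem.List.pyGetD list_or_tuple (i+1) 0 - 1) then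
        (true, some false)
      else (false, none)
    else
      if (PySem.List.pyRange 0 (PySem.List.len list_or_tuple - 1) 1).all
          (fun i => PySem.List.pyGetD list_or_tuple i 0 == PySem.List.pyGetD list_or_tuple (i+1) 0
                 || PySem.List.pyGetD list_or_tuple i 0 == PySem.List.pyGetD list_or_tuple (i+1) 0 - 1) then
        (true, some false)
      else if (PySem.List.pyRange 0 (PySem.List.len list_or_tuple - 1) 1).all
          (fun i => PySem.List.pyGetD list_or_tuple i 0 == PySem.List.pyGetD list_or_tuple (i+1) 0
                 || PySem.List.pyGetD list_or_tuple i 0 == PySem.List.pyGetD list_or_tuple (i+1) 0 + 1) then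
        (true, some true)
      else (false, none)

-- ===== PORT B =====
-- the fused scan over adjacent pairs (port of Source B's for-loop with early break)
def iscontiguousLoop (te : Bool) : List Int → Bool → Bool → Bool × Bool
  | x :: y :: t, asc_ok, desc_ok =>
      let eq := te && (x == y)
      let asc' := asc_ok && (eq || x == y - 1)
      let desc' := desc_ok && (eq || x == y + 1)
      if !asc' && !desc' then (asc', desc')
      else iscontiguousLoop te (y :: t) asc' desc'
  | _, asc_ok, desc_ok => (asc_ok, desc_ok)

def iscontiguous_alt (list_or_tuple : List Int) (tolearte_equalities : Bool) (check_reverse_first : Bool) : Bool × Option Bool :=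
  let r := iscontiguousLoop tolearte_equalities list_or_tuple true true
  if check_reverse_first then
    if r.2 then (true, some true)
    else if r.1 then (true, some false)
    else (false, none)
  else
    if r.1 then (true, some false)
    else if r.2 then (true, some true)
    else (false, none)

-- ===== PRECONDITION & SPEC =====
def Spec_iscontiguous (list_or_tuple : List Int) (tolearte_equalities : Bool) (check_reverse_first : Bool) (out : Bool × Option Bool) : Prop := out = iscontiguous_alt list_or_tuple tolearte_equalities check_reverse_first
instance (list_or_tuple : List Int) (tolearte_equalities : Bool) (check_reverse_first : Bool) (out : Bool × Option Bool) : Decidable (Spec_iscontiguous list_or_tuple tolearte_equalities check_reverse_first out) := by unfold Spec_iscontiguous; infer_instance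

-- ===== CLAIM (what is proved, stated in full; the proofs are below) =====
def Claim_equal_iscontiguous : Prop := ∀ (list_or_tuple : List Int) (tolearte_equalities : Bool) (check_reverse_first : Bool), Dom_iscontiguous list_or_tuple tolearte_equalities check_reverse_first → Spec_iscontiguous list_or_tuple tolearte_equalities check_reverse_first (iscontiguous list_or_tuple tolearte_equalities check_reverse_first)

-- ===== LEMMAS AND PROOFS =====

-- the adjacent-pair chain condition both programs decide
def pvChain (c : Int → Int → Bool) : List Int → Bool
  | x :: y :: t => c x y && pvChain c (y :: t)
  | _ => true

theorem pvGetD_shift (z : Int) (zs : List Int) (k : Nat) :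
    PySem.List.pyGetD (z :: zs) ((k : Int) + 1) 0 = PySem.List.pyGetD zs (k : Int) 0 := by
  have h : ((k : Int) + 1) = (((k + 1 : Nat)) : Int) := by push_cast; ring
  rw [h, PySem.List.pyGetD_natCast, PySem.List.pyGetD_natCast]
  simp

theorem pvAll_range_eq_chain (c : Int → Int → Bool) (xs : List Int) :
    ((List.range (xs.length - 1)).all
      (fun k => c (PySem.List.pyGetD xs (k : Int) 0) (PySem.List.pyGetD xs ((k : Int) + 1) 0)))
      = pvChain c xs := by
  induction xs with
  | nil => simp [pvChain]
  | cons x t ih =>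
    cases t with
    | nil => simp [pvChain]
    | cons y u =>
      have hr : List.range ((x :: y :: u).length - 1)
          = 0 :: (List.range ((y :: u).length - 1)).map (· + 1) := by
        simp [List.range_succ_eq_map]
      rw [hr]
      have hchain : pvChain c (x :: y :: u) = (c x y && pvChain c (y :: u)) := rfl
      rw [hchain, ← ih]
      simp only [List.all_cons, List.all_map, Function.comp_def]
      have hhead : c (PySem.List.pyGetD (x :: y :: u) ((0 : Nat) : Int) 0)
          (PySem.List.pyGetD (x :: y :: u) (((0 : Nat) : Int) + 1) 0) = c x y := by
        rw [pvGetD_shift x (y :: u) 0]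
        rw [PySem.List.pyGetD_natCast, PySem.List.pyGetD_natCast]
        simp
      rw [hhead]
      have htail : (fun k : Nat => c (PySem.List.pyGetD (x :: y :: u) ((k + 1 : Nat) : Int) 0)
            (PySem.List.pyGetD (x :: y :: u) (((k + 1 : Nat) : Int) + 1) 0))
          = (fun k : Nat => c (PySem.List.pyGetD (y :: u) (k : Int) 0)
            (PySem.List.pyGetD (y :: u) ((k : Int) + 1) 0)) := by
        funext k
        have h1 : ((k + 1 : Nat) : Int) = (k : Int) + 1 := by push_cast; ring
        have h2 : ((k + 1 : Nat) : Int) + 1 = (((k + 1 : Nat)) : Int) + 1 := rfl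
        rw [h1, pvGetD_shift x (y :: u) k, ← h1, h2, pvGetD_shift x (y :: u) (k + 1), h1]
      rw [htail]

theorem pvPyAll_eq_chain (c : Int → Int → Bool) (xs : List Int) :
    ((PySem.List.pyRange 0 (PySem.List.len xs - 1) 1).all
      (fun i => c (PySem.List.pyGetD xs i 0) (PySem.List.pyGetD xs (i+1) 0)))
      = pvChain c xs := by
  rw [PySem.List.pyRange_one]
  have hn : ((PySem.List.len xs) - 1 - 0).toNat = xs.length - 1 := by
    simp only [PySem.List.len]
    omega
  rw [hn, List.all_map, ← pvAll_range_eq_chain c xs]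
  have hfun : ((fun i => c (PySem.List.pyGetD xs i 0) (PySem.List.pyGetD xs (i+1) 0))
        ∘ (fun k : Nat => (0 : Int) + (k : Int)))
      = (fun k : Nat => c (PySem.List.pyGetD xs (k : Int) 0) (PySem.List.pyGetD xs ((k : Int) + 1) 0)) := by
    funext k
    simp only [Function.comp_apply, zero_add]
  rw [hfun]

-- the four concrete instances matching the port's lambdas (definitional specialisations)
theorem pvA_asc (xs : List Int) :
    ((PySem.List.pyRange 0 (PySem.List.len xs - 1) 1).all
      (fun i => PySem.List.pyGetD xs i 0 == PySem.List.pyGetD xs (i+1) 0 - 1))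
      = pvChain (fun x y => x == y - 1) xs := pvPyAll_eq_chain (fun a b => a == b - 1) xs

theorem pvA_desc (xs : List Int) :
    ((PySem.List.pyRange 0 (PySem.List.len xs - 1) 1).all
      (fun i => PySem.List.pyGetD xs i 0 == PySem.List.pyGetD xs (i+1) 0 + 1))
      = pvChain (fun x y => x == y + 1) xs := pvPyAll_eq_chain (fun a b => a == b + 1) xs

theorem pvA_ascT (xs : List Int) :
    ((PySem.List.pyRange 0 (PySem.List.len xs - 1) 1).all
      (fun i => PySem.List.pyGetD xs i 0 == PySem.List.pyGetD xs (i+1) 0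
             || PySem.List.pyGetD xs i 0 == PySem.List.pyGetD xs (i+1) 0 - 1))
      = pvChain (fun x y => x == y || x == y - 1) xs :=
  pvPyAll_eq_chain (fun a b => a == b || a == b - 1) xs

theorem pvA_descT (xs : List Int) :
    ((PySem.List.pyRange 0 (PySem.List.len xs - 1) 1).all
      (fun i => PySem.List.pyGetD xs i 0 == PySem.List.pyGetD xs (i+1) 0
             || PySem.List.pyGetD xs i 0 == PySem.List.pyGetD xs (i+1) 0 + 1))
      = pvChain (fun x y => x == y || x == y + 1) xs :=
  pvPyAll_eq_chain (fun a b => a == b || a == b + 1) xs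

theorem pvLoop_eq (te : Bool) (xs : List Int) (a d : Bool) :
    iscontiguousLoop te xs a d
      = (a && pvChain (fun x y => (te && (x == y)) || x == y - 1) xs,
         d && pvChain (fun x y => (te && (x == y)) || x == y + 1) xs) := by
  induction xs generalizing a d with
  | nil => simp [iscontiguousLoop, pvChain]
  | cons x t ih =>
    cases t with
    | nil => simp [iscontiguousLoop, pvChain]
    | cons y u =>
      show (if _ then _ else _) = _
      split
      · rename_i h
        simp only [Bool.and_eq_true, Bool.not_eq_true'] at h
        simp only [pvChain, ← Bool.and_assoc, h.1, h.2, Bool.false_and]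
      · rw [ih]
        simp only [pvChain, Bool.and_assoc]

-- ===== VERDICT (by name: the statement is the Claim_ definition above) =====
theorem iscontiguous_spec : Claim_equal_iscontiguous := by
  intro xs te cr _
  unfold Spec_iscontiguous iscontiguous iscontiguous_alt
  rw [pvLoop_eq, pvA_asc, pvA_desc, pvA_ascT, pvA_descT]
  cases te
  · simp only [Bool.false_and, Bool.false_or, Bool.not_false, if_true]
    cases cr <;>
      rcases h1 : pvChain (fun x y => x == y - 1) xs <;>
        rcases h2 : pvChain (fun x y => x == y + 1) xs <;>
        simp [h1, h2]
  · simp only [Bool.true_and, Bool.not_true, if_false]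
    cases cr <;>
      rcases h3 : pvChain (fun x y => x == y || x == y - 1) xs <;>
        rcases h4 : pvChain (fun x y => x == y || x == y + 1) xs <;>
        simp [h3, h4]
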